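-- pv_equiv track=rewrite | github.com/denisvl/pasm | src/parser/yaml_loader.py | _normalize_port_map
-- ===== SOURCE A (Python) =====
-- from typing import Any, Dict, List, Tuple
--
-- def _normalize_port_map(
--     port_map: Dict[str, Any], bus_bits: int, comp_id: str, direction: str, idx: int
-- ) -> set[int]:
--     max_port = 1 << bus_bits
--     mask = int(port_map.get("mask", 0))
--     value = int(port_map.get("value", 0))
--     if mask < 0 or value < 0:
--         raise ValidationError(
--             "Composition validation failed:\n"
--             f"metadata.id={comp_id}: maps.ports.{direction}[{idx}] mask/value must be non-negative"
--         )
--     if bus_bits > 16: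
--         raise ValidationError(
--             "Composition validation failed:\n"
--             f"metadata.id={comp_id}: port bus wider than 16 bits is not supported in v1"
--         )
--
--     matched: set[int] = set()
--     for port in range(max_port):
--         if (port & mask) == value:
--             matched.add(port)
--     return matched
-- ===== SOURCE B (Python) =====
-- class ValidationError(Exception):
--     pass
--
--
-- def _normalize_port_map(port_map, bus_bits, comp_id, direction, idx):
--     mask = int(port_map.get("mask", 0))
--     value = int(port_map.get("value", 0))
--     if mask < 0 or value < 0:
--         raise ValidationError(
--             "Composition validation failed:\n"
--             f"metadata.id={comp_id}: maps.ports.{direction}[{idx}] mask/value must be non-negative"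
--         )
--     if bus_bits > 16:
--         raise ValidationError(
--             "Composition validation failed:\n"
--             f"metadata.id={comp_id}: port bus wider than 16 bits is not supported in v1"
--         )
--     max_port = 1 << bus_bits  # raises ValueError for negative bus_bits, as in the original
--     # A port matches iff port == value | (free bits); impossible unless value's bits
--     # all lie inside mask and below the bus width.
--     if (value & mask) != value or value >= max_port:
--         return set()
--     results = [value]
--     for b in range(bus_bits):
--         if not ((mask >> b) & 1):  # bit b is free: double the solutions
--             results = results + [r | (1 << b) for r in results]
--     return set(results)
-- ===== Notes on version B (the rewrite author's own statement) =====
-- stated objective: faster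
-- what changed: Instead of scanning all 2^bus_bits ports and testing (port & mask) == value on each, B checks feasibility (value inside mask and below the bus width) and then generates exactly the matching ports by doubling the solution list over each free (non-mask) bit, so only the matches are ever enumerated.
import Mathlib
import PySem

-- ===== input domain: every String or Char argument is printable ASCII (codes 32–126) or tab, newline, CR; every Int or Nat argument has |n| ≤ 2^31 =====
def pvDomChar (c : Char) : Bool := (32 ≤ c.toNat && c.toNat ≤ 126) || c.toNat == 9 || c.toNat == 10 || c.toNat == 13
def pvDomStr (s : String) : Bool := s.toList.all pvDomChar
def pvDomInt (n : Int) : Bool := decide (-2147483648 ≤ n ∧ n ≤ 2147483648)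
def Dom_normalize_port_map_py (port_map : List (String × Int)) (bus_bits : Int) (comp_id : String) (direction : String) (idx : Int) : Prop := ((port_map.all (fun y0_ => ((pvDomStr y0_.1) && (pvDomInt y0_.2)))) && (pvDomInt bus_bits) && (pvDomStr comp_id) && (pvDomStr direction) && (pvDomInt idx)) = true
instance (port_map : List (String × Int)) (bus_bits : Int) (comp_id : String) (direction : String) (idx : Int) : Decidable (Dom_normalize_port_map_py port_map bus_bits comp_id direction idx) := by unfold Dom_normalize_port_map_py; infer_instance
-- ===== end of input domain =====

-- B replaces A's scan of all 2^bus_bits ports by direct generation of the matching ports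
-- (doubling over the free bits), an asymptotically smaller enumeration.

-- port_map.get(key, 0): first-match association-list lookup (the dict convention)
def pvLookup (port_map : List (String × Int)) (k : String) : Int :=
  ((port_map.find? (fun p => p.1 == k)).map Prod.snd).getD 0

-- ===== PORT A =====
def normalize_port_map_py (port_map : List (String × Int)) (bus_bits : Int) (comp_id : String) (direction : String) (idx : Int) : List Int :=
  let max_port : Int := (1 : Int) <<< bus_bits.toNat
  let mask := pvLookup port_map "mask"
  let value := pvLookup port_map "value"
  -- the two 'raise ValidationError' branches and the negative-shift ValueError lie outside Pre_
  (PySem.List.pyRange 0 max_port 1).foldl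
    (fun matched port => if PySem.Int.band port mask = value then PySem.Set.add matched port else matched)
    PySem.Set.empty

-- ===== PORT B =====
def normalize_port_map_py_alt (port_map : List (String × Int)) (bus_bits : Int) (comp_id : String) (direction : String) (idx : Int) : List Int :=
  let mask := pvLookup port_map "mask"
  let value := pvLookup port_map "value"
  let max_port : Int := (1 : Int) <<< bus_bits.toNat
  if PySem.Int.band value mask ≠ value ∨ max_port ≤ value then []
  else
    PySem.Set.ofList
      ((PySem.List.pyRange 0 bus_bits 1).foldl
        (fun results b =>
          if PySem.Int.band (mask >>> b.toNat) 1 = 0 then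
            results ++ results.map (fun r => PySem.Int.bor r ((1 : Int) <<< (b.toNat : Int)))
          else results)
        [value])

-- ===== PRECONDITION & SPEC =====
-- Pre_ excludes exactly the inputs where the Python A raises: negative bus_bits
-- (ValueError at 1 << bus_bits), bus_bits > 16 and negative mask/value (ValidationError).
def Pre_normalize_port_map_py (port_map : List (String × Int)) (bus_bits : Int) (comp_id : String) (direction : String) (idx : Int) : Prop :=
  0 ≤ bus_bits ∧ bus_bits ≤ 16 ∧ 0 ≤ pvLookup port_map "mask" ∧ 0 ≤ pvLookup port_map "value"
instance (port_map : List (String × Int)) (bus_bits : Int) (comp_id : String) (direction : String) (idx : Int) : Decidable (Pre_normalize_port_map_py port_map bus_bits comp_id direction idx) := by unfold Pre_normalize_port_map_py; infer_instance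

def pvWitness_normalize_port_map_py : (List (String × Int)) × Int × String × String × Int :=
  ([("mask", 6), ("value", 4)], 3, "c", "in", 0)

def Spec_normalize_port_map_py (port_map : List (String × Int)) (bus_bits : Int) (comp_id : String) (direction : String) (idx : Int) (out : List Int) : Prop := out = normalize_port_map_py_alt port_map bus_bits comp_id direction idx
instance (port_map : List (String × Int)) (bus_bits : Int) (comp_id : String) (direction : String) (idx : Int) (out : List Int) : Decidable (Spec_normalize_port_map_py port_map bus_bits comp_id direction idx out) := by unfold Spec_normalize_port_map_py; infer_instance

-- ===== CLAIM (what is proved, stated in full; the proofs are below) =====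
def Claim_equal_normalize_port_map_py : Prop := ∀ (port_map : List (String × Int)) (bus_bits : Int) (comp_id : String) (direction : String) (idx : Int), Dom_normalize_port_map_py port_map bus_bits comp_id direction idx → Pre_normalize_port_map_py port_map bus_bits comp_id direction idx → Spec_normalize_port_map_py port_map bus_bits comp_id direction idx (normalize_port_map_py port_map bus_bits comp_id direction idx)

-- ===== LEMMAS AND PROOFS =====

theorem pv_or_eq_add (a b : Nat) (h : a &&& b = 0) : a ||| b = a + b := by
  induction a using Nat.strong_induction_on generalizing b with
  | _ a ih =>
    rcases Nat.eq_zero_or_pos a with ha | ha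
    · simp [ha]
    · have hd : a / 2 &&& b / 2 = 0 := by
        rw [← Nat.and_div_two, h]
      have ih2 : a / 2 ||| b / 2 = a / 2 + b / 2 := ih (a / 2) (Nat.div_lt_self ha (by omega)) _ hd
      have hm : a % 2 &&& b % 2 = 0 := by
        have := Nat.and_mod_two_pow (a := a) (b := b) (n := 1)
        simp [Nat.pow_one, h] at this
        omega
      have h2 : (a ||| b) = 2 * (a / 2 ||| b / 2) + (a % 2 ||| b % 2) := by
        have hdiv := Nat.or_div_two (a := a) (b := b)
        have hmod : (a ||| b) % 2 = a % 2 ||| b % 2 := by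
          have := Nat.or_mod_two_pow (a := a) (b := b) (n := 1)
          simpa [Nat.pow_one] using this
        omega
      have hbit : a % 2 ||| b % 2 = a % 2 + b % 2 := by
        have h1 : a % 2 < 2 := Nat.mod_lt _ (by omega)
        have h2 : b % 2 < 2 := Nat.mod_lt _ (by omega)
        interval_cases h : a % 2 <;> interval_cases h' : b % 2 <;> simp_all
      omega

-- bit k of m, read as the loop reads it
theorem pv_bitfree_iff (m k : Nat) : (m >>> k) &&& 1 = 0 ↔ m.testBit k = false := by
  simp [Nat.testBit, Nat.and_comm]
theorem pv_two_pow_and_eq_zero_iff (m k : Nat) : 2 ^ k &&& m = 0 ↔ m.testBit k = false := by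
  constructor
  · intro h
    by_contra hb
    have hb' : m.testBit k = true := by simpa using hb
    have : (2 ^ k &&& m).testBit k = true := by
      simp [Nat.testBit_and, hb', Nat.testBit_two_pow_self]
    rw [h] at this; simp at this
  · intro h
    apply Nat.eq_of_testBit_eq
    intro i
    by_cases hik : i = k
    · subst hik; simp [Nat.testBit_and, h]
    · simp [Nat.testBit_and, Nat.testBit_two_pow_of_ne (fun he => hik he.symm)]

theorem pv_disj_of_sub (s v m : Nat) (hs : s &&& m = 0) (hv : v &&& m = v) : v &&& s = 0 := by
  calc v &&& s = (v &&& m) &&& s := by rw [hv]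
    _ = v &&& (s &&& m) := by rw [Nat.and_assoc, Nat.and_comm m s]
    _ = 0 := by rw [hs, Nat.and_zero]

theorem pv_two_pow_add (b i : Nat) (h : b < 2 ^ i) : 2 ^ i + b = 2 ^ i ||| b := by
  have := Nat.two_pow_add_eq_or_of_lt h (a := 1)
  simpa using this

theorem pv_or_eq_zero (a b : Nat) : (a ||| b = 0) ↔ (a = 0 ∧ b = 0) := by
  constructor
  · intro h
    have h1 : a ≤ a ||| b := Nat.left_le_or
    have h2 : b ≤ a ||| b := Nat.right_le_or
    omega
  · rintro ⟨rfl, rfl⟩; simp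

theorem pv_bfold (m v : Nat) : ∀ k : Nat,
    (List.range k).foldl
      (fun rs b => if (m >>> b) &&& 1 = 0 then rs ++ rs.map (fun r => r ||| (1 <<< b)) else rs)
      [v]
    = ((List.range (2 ^ k)).filter (fun s => s &&& m == 0)).map (fun s => v ||| s) := by
  intro k
  induction k with
  | zero => simp [List.range_succ]
  | succ k ih =>
    rw [List.range_succ, List.foldl_append]
    have hsplit : List.range (2 ^ (k + 1)) = List.range (2 ^ k) ++ (List.range (2 ^ k)).map (2 ^ k + ·) := by
      rw [pow_succ, mul_two, List.range_add]
    rw [hsplit, List.filter_append, List.map_append, List.filter_map]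
    have hup : ∀ x ∈ List.range (2 ^ k),
        ((fun s => s &&& m == 0) ∘ (2 ^ k + ·)) x = ((2 ^ k &&& m == 0) && (x &&& m == 0)) := by
      intro x hx
      have hxlt : x < 2 ^ k := List.mem_range.mp hx
      simp only [Function.comp]
      rw [pv_two_pow_add x k hxlt, Nat.and_or_distrib_right]
      have hoz := pv_or_eq_zero (2 ^ k &&& m) (x &&& m)
      by_cases h1 : 2 ^ k &&& m = 0 <;> by_cases h2 : x &&& m = 0
      · simp [h1, h2]
      · have hno : ¬ (2 ^ k &&& m ||| x &&& m = 0) := fun hh => h2 (hoz.mp hh).2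
        simp [h1, h2, hno]
      · have hno : ¬ (2 ^ k &&& m ||| x &&& m = 0) := fun hh => h1 (hoz.mp hh).1
        simp [h1, h2, hno]
      · have hno : ¬ (2 ^ k &&& m ||| x &&& m = 0) := fun hh => h1 (hoz.mp hh).1
        rw [show (2 ^ k &&& m ||| x &&& m == 0) = false from beq_eq_false_iff_ne.mpr hno,
            show (2 ^ k &&& m == 0) = false from beq_eq_false_iff_ne.mpr h1]
        simp
    rw [List.filter_congr hup]
    by_cases hbit : m.testBit k = false
    · have hc : (m >>> k) &&& 1 = 0 := (pv_bitfree_iff m k).mpr hbit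
      have hz : 2 ^ k &&& m = 0 := (pv_two_pow_and_eq_zero_iff m k).mpr hbit
      simp only [List.foldl_cons, List.foldl_nil]
      rw [if_pos hc, ih, hz]
      simp only [beq_self_eq_true, Bool.true_and]
      rw [List.map_map, List.map_map]
      congr 1
      apply List.map_congr_left
      intro s hs
      have hslt : s < 2 ^ k := List.mem_range.mp (List.mem_of_mem_filter hs)
      simp only [Function.comp]
      rw [Nat.one_shiftLeft, pv_two_pow_add s k hslt,
        Nat.or_assoc, Nat.or_comm (2 ^ k) s]
    · have hbit' : m.testBit k = true := by simpa using hbit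
      have hc : ¬ ((m >>> k) &&& 1 = 0) := by
        rw [pv_bitfree_iff]; simp [hbit']
      have hz : ¬ (2 ^ k &&& m = 0) := by
        rw [pv_two_pow_and_eq_zero_iff]; simp [hbit']
      simp only [List.foldl_cons, List.foldl_nil]
      rw [if_neg hc, ih]
      have hnil : (List.range (2 ^ k)).filter (fun x => (2 ^ k &&& m == 0) && (x &&& m == 0)) = [] := by
        apply List.filter_eq_nil_iff.mpr
        intro x _
        simp [hz]
      rw [hnil]
      simp

theorem pv_filter_match (n m v : Nat) (hv : v &&& m = v) (hvn : v < 2 ^ n) :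
    (List.range (2 ^ n)).filter (fun p => p &&& m == v)
    = ((List.range (2 ^ n)).filter (fun s => s &&& m == 0)).map (fun s => v ||| s) := by
  have hadd : ∀ s : Nat, s &&& m = 0 → v ||| s = v + s := by
    intro s hs
    exact pv_or_eq_add v s (pv_disj_of_sub s v m hs hv)
  -- membership in the left list
  have hmemL : ∀ x, x ∈ (List.range (2 ^ n)).filter (fun p => p &&& m == v) ↔ (x < 2 ^ n ∧ x &&& m = v) := by
    intro x
    simp [List.mem_filter, List.mem_range]
  -- membership in the right list
  have hmemR : ∀ x, x ∈ ((List.range (2 ^ n)).filter (fun s => s &&& m == 0)).map (fun s => v ||| s)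
      ↔ (x < 2 ^ n ∧ x &&& m = v) := by
    intro x
    simp only [List.mem_map, List.mem_filter, List.mem_range, beq_iff_eq]
    constructor
    · rintro ⟨s, ⟨hslt, hs0⟩, rfl⟩
      refine ⟨Nat.or_lt_two_pow hvn hslt, ?_⟩
      rw [Nat.and_or_distrib_right, hv, hs0, Nat.or_zero]
    · rintro ⟨hxlt, hxm⟩
      refine ⟨x ^^^ v, ⟨Nat.xor_lt_two_pow hxlt hvn, ?_⟩, ?_⟩
      · rw [Nat.and_xor_distrib_right, hxm, hv, Nat.xor_self]
      · -- v ||| (x ^^^ v) = x, using v = x &&& m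
        subst hxm
        apply Nat.eq_of_testBit_eq
        intro i
        simp only [Nat.testBit_or, Nat.testBit_xor, Nat.testBit_and]
        cases hxi : x.testBit i <;> cases hmi : m.testBit i <;> rfl
    -- nodup of the filtered source
  have hnod : ((List.range (2 ^ n)).filter (fun s => s &&& m == 0)).Nodup :=
    (List.nodup_range).filter _
  have hnodL : ((List.range (2 ^ n)).filter (fun p => p &&& m == v)).Nodup :=
    (List.nodup_range).filter _
  have hnodR : (((List.range (2 ^ n)).filter (fun s => s &&& m == 0)).map (fun s => v ||| s)).Nodup := by
    apply List.Nodup.map_on _ hnod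
    intro x hx y hy hxy
    have hx0 : x &&& m = 0 := by simpa using (List.mem_filter.mp hx).2
    have hy0 : y &&& m = 0 := by simpa using (List.mem_filter.mp hy).2
    rw [hadd x hx0, hadd y hy0] at hxy
    omega
  have hperm : ((List.range (2 ^ n)).filter (fun p => p &&& m == v)).Perm
      (((List.range (2 ^ n)).filter (fun s => s &&& m == 0)).map (fun s => v ||| s)) :=
    (List.perm_ext_iff_of_nodup hnodL hnodR).mpr (fun a => (hmemL a).trans (hmemR a).symm)
  have hpwL : ((List.range (2 ^ n)).filter (fun p => p &&& m == v)).Pairwise (· ≤ ·) :=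
    ((List.pairwise_lt_range).filter _).imp Nat.le_of_lt
  have hpwR : (((List.range (2 ^ n)).filter (fun s => s &&& m == 0)).map (fun s => v ||| s)).Pairwise (· ≤ ·) := by
    apply List.pairwise_map.mpr
    apply List.Pairwise.imp_of_mem ?_ ((List.pairwise_lt_range).filter (fun s => s &&& m == 0))
    intro a b ha hb hab
    have ha0 : a &&& m = 0 := by simpa using (List.mem_filter.mp ha).2
    have hb0 : b &&& m = 0 := by simpa using (List.mem_filter.mp hb).2
    rw [hadd a ha0, hadd b hb0]
    omega
  exact hperm.eq_of_pairwise (fun a b _ _ h1 h2 => Nat.le_antisymm h1 h2) hpwL hpwR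

theorem pv_gen_nodup (n m v : Nat) (hv : v &&& m = v) :
    (((List.range (2 ^ n)).filter (fun s => s &&& m == 0)).map (fun s => v ||| s)).Nodup := by
  apply List.Nodup.map_on _ ((List.nodup_range).filter _)
  intro x hx y hy hxy
  have hx0 : x &&& m = 0 := by simpa using (List.mem_filter.mp hx).2
  have hy0 : y &&& m = 0 := by simpa using (List.mem_filter.mp hy).2
  rw [pv_or_eq_add v x (pv_disj_of_sub x v m hx0 hv),
    pv_or_eq_add v y (pv_disj_of_sub y v m hy0 hv)] at hxy
  omega

theorem pv_foldl_set_add (p : Int → Prop) [DecidablePred p] : ∀ (l : List Int) (acc : List Int),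
    l.Nodup → (∀ x ∈ l, x ∉ acc) →
    l.foldl (fun s x => if p x then PySem.Set.add s x else s) acc
      = acc ++ l.filter (fun x => decide (p x)) := by
  intro l
  induction l with
  | nil => simp
  | cons a t ih =>
    intro acc hnd hacc
    simp only [List.foldl_cons]
    by_cases hpa : p a
    · rw [if_pos hpa, PySem.Set.add_of_not_mem (hacc a (List.mem_cons_self))]
      rw [ih (acc ++ [a]) hnd.of_cons ?_]
      · simp [hpa]
      · intro x hx
        simp only [List.mem_append, List.mem_singleton]
        rintro (hmem | rfl)
        · exact hacc x (List.mem_cons_of_mem _ hx) hmem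
        · exact (List.nodup_cons.mp hnd).1 hx
    · rw [if_neg hpa, ih acc hnd.of_cons (fun x hx => hacc x (List.mem_cons_of_mem _ hx))]
      simp [hpa]

theorem pv_set_ofList_aux : ∀ (l acc : List Int), l.Nodup → (∀ x ∈ l, x ∉ acc) →
    l.foldl PySem.Set.add acc = acc ++ l := by
  intro l
  induction l with
  | nil => simp
  | cons a t ih =>
    intro acc hnd hacc
    simp only [List.foldl_cons]
    rw [PySem.Set.add_of_not_mem (hacc a (List.mem_cons_self))]
    rw [ih (acc ++ [a]) hnd.of_cons ?_]
    · simp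
    · intro x hx
      simp only [List.mem_append, List.mem_singleton]
      rintro (hmem | rfl)
      · exact hacc x (List.mem_cons_of_mem _ hx) hmem
      · exact (List.nodup_cons.mp hnd).1 hx

theorem pv_set_ofList_nodup (l : List Int) (h : l.Nodup) : PySem.Set.ofList l = l := by
  rw [PySem.Set.ofList_eq_foldl]
  simpa using pv_set_ofList_aux l [] h (by simp)

theorem pv_shl_cast (a : Nat) : ((1 : Int) <<< (a : Int)) = ((1 <<< a : Nat) : Int) := by
  rw [show (1 : Int) = ((1 : Nat) : Int) by simp, Int.shiftLeft_natCast]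

theorem pv_shl_cast' (a : Nat) : ((1 : Int) <<< a) = ((1 <<< a : Nat) : Int) := by
  rw [← Int.shiftLeft_natCast_right, pv_shl_cast]

theorem pv_bfold_cast (m v : Nat) : ∀ (l : List Nat) (acc : List Nat),
    (l.map (fun j : Nat => (j : Int))).foldl
      (fun results b => if PySem.Int.band ((m : Int) >>> b.toNat) 1 = 0 then
          results ++ results.map (fun r => PySem.Int.bor r ((1 : Int) <<< (b.toNat : Int)))
        else results)
      (acc.map (fun j : Nat => (j : Int)))
    = (l.foldl
        (fun rs b => if (m >>> b) &&& 1 = 0 then rs ++ rs.map (fun r => r ||| (1 <<< b)) else rs)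
        acc).map (fun j : Nat => (j : Int)) := by
  intro l
  induction l with
  | nil => simp
  | cons a t ih =>
    intro acc
    simp only [List.map_cons, List.foldl_cons, Int.toNat_natCast]
    have hsh : ((m : Int) >>> ((a : Nat) : Int)) = ((m >>> a : Nat) : Int) := by simp
    have hcond : (PySem.Int.band ((m : Int) >>> ((a : Nat) : Int)) 1 = 0) ↔ ((m >>> a) &&& 1 = 0) := by
      rw [hsh, show (1 : Int) = ((1 : Nat) : Int) from rfl, PySem.Int.band_natCast]
      exact Nat.cast_eq_zero
    by_cases hc : (m >>> a) &&& 1 = 0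
    · rw [if_pos (hcond.mpr hc), if_pos hc]
      rw [← ih (acc ++ acc.map (fun r => r ||| (1 <<< a)))]
      have hstate : (acc ++ acc.map (fun r => r ||| (1 <<< a))).map (fun j : Nat => (j : Int))
          = acc.map (fun j : Nat => (j : Int))
            ++ (acc.map (fun j : Nat => (j : Int))).map
                (fun r => PySem.Int.bor r ((1 : Int) <<< ((a : Nat) : Int))) := by
        rw [List.map_append]
        simp only [List.map_map]
        apply congrArg
        apply List.map_congr_left
        intro r _
        simp only [Function.comp]
        rw [pv_shl_cast a, PySem.Int.bor_natCast]
      rw [hstate]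
    · rw [if_neg (fun hh => hc (hcond.mp hh)), if_neg hc, ih]

theorem pv_main (port_map : List (String × Int)) (bus_bits : Int) (comp_id : String) (direction : String) (idx : Int)
    (h : Pre_normalize_port_map_py port_map bus_bits comp_id direction idx) :
    normalize_port_map_py port_map bus_bits comp_id direction idx
      = normalize_port_map_py_alt port_map bus_bits comp_id direction idx := by
  obtain ⟨hb0, _hb16, hm0, hv0⟩ := h
  simp only [normalize_port_map_py, normalize_port_map_py_alt]
  set n : Nat := bus_bits.toNat with hn
  set m : Nat := (pvLookup port_map "mask").toNat with hm
  set v : Nat := (pvLookup port_map "value").toNat with hv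
  have hmI : pvLookup port_map "mask" = (m : Int) := (Int.toNat_of_nonneg hm0).symm
  have hvI : pvLookup port_map "value" = (v : Int) := (Int.toNat_of_nonneg hv0).symm
  rw [hmI, hvI]
  -- the A-side range as a cast of List.range (2 ^ n)
  have hM : ((1 : Int) <<< n - 0).toNat = 2 ^ n := by
    rw [pv_shl_cast' n, Int.sub_zero, Int.toNat_natCast, Nat.shiftLeft_eq, one_mul]
  have hrangeA : PySem.List.pyRange 0 ((1 : Int) <<< n) 1
      = (List.range (2 ^ n)).map (fun j : Nat => (j : Int)) := by
    rw [PySem.List.pyRange_one, hM]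
    simp
  rw [hrangeA]
  have hAnodup : ((List.range (2 ^ n)).map (fun j : Nat => (j : Int))).Nodup :=
    (List.nodup_range).map Nat.cast_injective
  rw [pv_foldl_set_add (fun x => PySem.Int.band x (↑m) = (↑v : Int)) _ _ hAnodup
    (fun x _ hx => by simp [PySem.Set.empty] at hx)]
  have hpred : ∀ p ∈ List.range (2 ^ n),
      ((fun x => decide (PySem.Int.band x (↑m) = (↑v : Int))) ∘ (fun j : Nat => (j : Int))) p
        = (p &&& m == v) := by
    intro p _
    simp only [Function.comp, PySem.Int.band_natCast, Nat.cast_inj]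
    by_cases hpv : p &&& m = v <;> simp [hpv]
  rw [List.filter_map, List.filter_congr hpred]
  have hguard : (¬ PySem.Int.band (↑v) (↑m) = (↑v : Int) ∨ (1 : Int) <<< n ≤ ↑v)
      ↔ ¬ (v &&& m = v ∧ v < 2 ^ n) := by
    rw [PySem.Int.band_natCast, pv_shl_cast' n, Nat.shiftLeft_eq, one_mul]
    rw [not_and_or]
    constructor
    · rintro (hne | hle)
      · exact Or.inl (fun he => hne (by exact_mod_cast he))
      · exact Or.inr (by omega)
    · rintro (hne | hle)
      · exact Or.inl (fun he => hne (by exact_mod_cast he))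
      · exact Or.inr (by exact_mod_cast by omega)
  by_cases hfeas : v &&& m = v ∧ v < 2 ^ n
  · rw [if_neg (fun hg => (hguard.mp hg) hfeas)]
    have hrangeB : PySem.List.pyRange 0 bus_bits 1 = (List.range n).map (fun j : Nat => (j : Int)) := by
      rw [PySem.List.pyRange_one, show (bus_bits - 0).toNat = n by omega]
      simp
    rw [hrangeB, show ([(↑v : Int)]) = ([v].map (fun j : Nat => (j : Int))) by simp]
    rw [pv_bfold_cast m v (List.range n) [v], pv_bfold m v n]
    rw [pv_set_ofList_nodup _ ((pv_gen_nodup n m v hfeas.1).map Nat.cast_injective)]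
    rw [pv_filter_match n m v hfeas.1 hfeas.2]
    simp [PySem.Set.empty]
  · rw [if_pos (hguard.mpr hfeas)]
    rw [not_and_or] at hfeas
    have hnil : (List.range (2 ^ n)).filter (fun p => p &&& m == v) = [] := by
      apply List.filter_eq_nil_iff.mpr
      intro p hp
      have hplt : p < 2 ^ n := List.mem_range.mp hp
      rcases hfeas with hvm | hvn
      · intro hc
        have hc' : p &&& m = v := by simpa using hc
        apply hvm
        rw [← hc', Nat.and_assoc, Nat.and_self]
      · intro hc
        have hc' : p &&& m = v := by simpa using hc
        have : p &&& m ≤ p := Nat.and_le_left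
        omega
    rw [hnil]
    simp

-- ===== VERDICT (by name: the statement is the Claim_ definition above) =====
theorem normalize_port_map_py_spec : Claim_equal_normalize_port_map_py := by
  intro port_map bus_bits comp_id direction idx _ hpre
  unfold Spec_normalize_port_map_py
  exact pv_main port_map bus_bits comp_id direction idx hpre
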